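-- pv_equiv track=rewrite | github.com/josueRdgz/Codeforces-codes | H_CoffeeBreak.py | CoffeeBreak
-- ===== SOURCE A (Python) =====
-- from collections import deque
--
-- def CoffeeBreak(n):
--     maximum = [0] * len(n)
--
--     for i in range(len(n)):
--         duplicated = n.copy()
--         inqueue = set()
--         queue = deque()
--         for j in range(len(n)):
--             if duplicated[j] >= 2 and j != i:
--                 queue.append(j)
--                 inqueue.add(j)
--
--         while queue:
--             j = queue.popleft()
--             inqueue.remove(j)
--             half = duplicated[j]//2
--             if j - 1 >= 0:
--                 duplicated[j-1] += half
--                 if duplicated[j - 1] >= 2 and j-1 != i and (j - 1) not in inqueue: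
--                     queue.append(j - 1)
--                     inqueue.add(j - 1)
--             if j + 1 < len(n):
--                 duplicated[j + 1] += half
--                 if duplicated[j + 1] >= 2 and j+1 != i and (j + 1) not in inqueue:
--                     queue.append(j + 1)
--                     inqueue.add(j + 1)
--
--             duplicated[j] %= 2
--
--         maximum[i] = duplicated[i]
--
--     return maximum
-- ===== SOURCE B (Python) =====
-- def CoffeeBreak(n):
--     L = len(n)
--     res = []
--     for i in range(L):
--         d = n.copy()
--         changed = True
--         while changed:
--             changed = False
--             for j in range(L):
--                 if j != i and d[j] >= 2:
--                     h = d[j] // 2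
--                     if j - 1 >= 0:
--                         d[j - 1] += h
--                     if j + 1 < L:
--                         d[j + 1] += h
--                     d[j] %= 2
--                     changed = True
--         res.append(d[i])
--     return res
-- ===== Notes on version B (the rewrite author's own statement) =====
-- stated objective: simpler
-- what changed: Replaced the event-driven worklist (deque + inqueue membership set) with repeated full left-to-right sweeps that fire every eligible position until a whole pass fires nothing; correctness of the different firing order rests on the abelian/confluence property of the halving-diffusion process, proved in Lean via a diamond lemma and uniqueness of the stable configuration.
import Mathlib
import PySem

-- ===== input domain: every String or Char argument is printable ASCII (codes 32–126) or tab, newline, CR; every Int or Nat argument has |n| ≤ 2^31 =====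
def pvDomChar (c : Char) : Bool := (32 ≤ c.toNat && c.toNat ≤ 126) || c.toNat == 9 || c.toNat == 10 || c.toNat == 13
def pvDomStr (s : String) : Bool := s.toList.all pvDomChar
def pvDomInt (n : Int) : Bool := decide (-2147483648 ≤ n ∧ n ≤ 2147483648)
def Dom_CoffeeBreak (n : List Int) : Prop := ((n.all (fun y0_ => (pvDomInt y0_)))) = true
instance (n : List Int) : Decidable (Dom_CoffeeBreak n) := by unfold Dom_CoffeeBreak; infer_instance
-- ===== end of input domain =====

-- B replaces A's event-driven worklist (deque + inqueue membership set) by repeated full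
-- left-to-right sweeps run to a fixpoint (objective: simpler control structure); the results
-- agree because the firing process is confluent, which is proved below via a diamond lemma.

-- ===== PORT A =====
-- Shared firing step: the three update statements both Pythons perform at position j
-- (duplicated[j-1] += half; duplicated[j+1] += half; duplicated[j] %= 2).

def cbFire (L j : Nat) (d : List Int) : List Int :=
  let half := PySem.Int.floordiv (d.getD j 0) 2
  let d1 := if 1 ≤ j then d.set (j-1) (d.getD (j-1) 0 + half) else d
  let d2 := if j+1 < L then d1.set (j+1) (d1.getD (j+1) 0 + half) else d1
  d2.set j (PySem.Int.mod (d2.getD j 0) 2)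

-- fuel bound for the while-loops; provably sufficient (lemmas cbPot_le / loopA_spec / loopB_spec below)
def cbFuel (n : List Int) : Nat :=
  (n.map Int.toNat).sum * (n.length+1) * (n.length+1) + n.length + 1

-- the while-queue loop of A; fuel only makes the recursion structural (it never runs out).
-- inqueue.remove(j) is ported as Set.discard: j is always a member, since inqueue mirrors the
-- queue (invariant cbInvA below), so discard computes exactly what Python's remove does.
def cbLoopA (L i : Nat) : Nat → List Int → List Nat → PySem.Set Nat → List Int
  | 0, dup, _, _ => dup
  | _+1, dup, [], _ => dup
  | f+1, dup, j :: q, s =>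
      let s1 := PySem.Set.discard s j
      let d := cbFire L j dup
      let p1 := if 1 ≤ j ∧ 2 ≤ d.getD (j-1) 0 ∧ j-1 ≠ i ∧ (j-1) ∉ s1 then
                  (q ++ [j-1], PySem.Set.add s1 (j-1)) else (q, s1)
      let p2 := if j+1 < L ∧ 2 ≤ d.getD (j+1) 0 ∧ j+1 ≠ i ∧ (j+1) ∉ p1.2 then
                  (p1.1 ++ [j+1], PySem.Set.add p1.2 (j+1)) else p1
      cbLoopA L i f d p2.1 p2.2

def CoffeeBreak (n : List Int) : List Int :=
  let L := n.length
  (List.range L).map (fun i =>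
    let q := (List.range L).filter (fun j => decide (2 ≤ n.getD j 0 ∧ j ≠ i))
    let s : PySem.Set Nat := PySem.Set.ofList q
    (cbLoopA L i (cbFuel n) n q s).getD i 0)

-- ===== PORT B =====
-- one full left-to-right pass of B: fire every eligible j, report whether anything fired
def cbPass (L i : Nat) (d : List Int) : List Int × Bool :=
  (List.range L).foldl
    (fun st j => if j ≠ i ∧ 2 ≤ st.1.getD j 0 then (cbFire L j st.1, true) else st)
    (d, false)

-- repeat passes until a pass fires nothing (fuel never runs out, see loopB_spec below)
def cbLoopB (L i : Nat) : Nat → List Int → List Int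
  | 0, d => d
  | f+1, d =>
      let r := cbPass L i d
      if r.2 then cbLoopB L i f r.1 else r.1

def CoffeeBreak_alt (n : List Int) : List Int :=
  let L := n.length
  (List.range L).map (fun i => (cbLoopB L i (cbFuel n) n).getD i 0)

-- ===== PRECONDITION & SPEC =====
def Spec_CoffeeBreak (n : List Int) (out : List Int) : Prop := out = CoffeeBreak_alt n
instance (n : List Int) (out : List Int) : Decidable (Spec_CoffeeBreak n out) := by unfold Spec_CoffeeBreak; infer_instance

-- ===== CLAIM (what is proved, stated in full; the proofs are below) =====
def Claim_equal_CoffeeBreak : Prop := ∀ (n : List Int), Dom_CoffeeBreak n → Spec_CoffeeBreak n (CoffeeBreak n)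

-- ===== LEMMAS AND PROOFS =====
-- The two loops fire positions in different orders. Both results are stable configurations
-- reachable from n by single firings (cbStep); cbStep has the diamond property, so the stable
-- configuration is unique and the two results coincide.

def cbBulk (L j : Nat) (h : Int) (d : List Int) : List Int :=
  let d1 := if 1 ≤ j then d.set (j-1) (d.getD (j-1) 0 + h) else d
  let d2 := if j+1 < L then d1.set (j+1) (d1.getD (j+1) 0 + h) else d1
  d2.set j (d2.getD j 0 - 2*h)

def cbDlt (L j k : Nat) : Int :=
  if k = j then -2 else if k+1 = j ∨ (k = j+1 ∧ k < L) then 1 else 0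

def cbFire1 (L j : Nat) (d : List Int) : List Int :=
  let d1 := if 1 ≤ j then d.set (j-1) (d.getD (j-1) 0 + 1) else d
  let d2 := if j+1 < L then d1.set (j+1) (d1.getD (j+1) 0 + 1) else d1
  d2.set j (d2.getD j 0 - 2)

def cbStep (L i : Nat) (c c' : List Int) : Prop :=
  c.length = L ∧ ∃ j, j < L ∧ j ≠ i ∧ 2 ≤ c.getD j 0 ∧ c' = cbFire1 L j c

def cbNormal (L i : Nat) (c : List Int) : Prop :=
  ∀ j, j < L → j ≠ i → c.getD j 0 < 2

def cbW (L j : Nat) : Nat := (j+1) * (L - j)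

def cbPot (c : List Int) : Nat :=
  ∑ k ∈ Finset.range c.length, (c.getD k 0).toNat * cbW c.length k

def cbInvA (L i : Nat) (dup : List Int) (q : List Nat) (s : List Nat) : Prop :=
  dup.length = L ∧ q.Nodup ∧ (∀ k, k ∈ s ↔ k ∈ q) ∧
  (∀ k ∈ q, k < L ∧ k ≠ i ∧ 2 ≤ dup.getD k 0) ∧
  (∀ k, k < L → k ≠ i → 2 ≤ dup.getD k 0 → k ∈ q)

lemma cbGetD_set (c : List Int) (p : Nat) (v : Int) (k : Nat) :
    (c.set p v).getD k 0 = if k = p ∧ p < c.length then v else c.getD k 0 := by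
  simp [List.getD, List.getElem?_set]
  split_ifs with h1 h2 <;> simp_all

lemma cbGetD_addAt (c : List Int) (p : Nat) (a : Int) (hp : p < c.length) (m : Nat) :
    (c.set p (c.getD p 0 + a)).getD m 0 = c.getD m 0 + if m = p then a else 0 := by
  rw [cbGetD_set]
  by_cases hm : m = p
  · subst hm; simp [hp]
  · simp [hm]

lemma cbBulk_getD (L j : Nat) (h : Int) (d : List Int) (hL : d.length = L) (hj : j < L) (k : Nat) :
    (cbBulk L j h d).getD k 0 = d.getD k 0 + h * cbDlt L j k := by
  simp only [cbBulk]
  set d1 := if 1 ≤ j then d.set (j-1) (d.getD (j-1) 0 + h) else d with hd1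
  set d2 := if j+1 < L then d1.set (j+1) (d1.getD (j+1) 0 + h) else d1 with hd2
  have l1 : d1.length = L := by rw [hd1]; split_ifs <;> simp [hL]
  have l2 : d2.length = L := by rw [hd2]; split_ifs <;> simp [l1]
  have e1 : ∀ m, d1.getD m 0 = d.getD m 0 + if 1 ≤ j ∧ m = j-1 then h else 0 := by
    intro m; rw [hd1]; split_ifs with g1 g2 g3
    · rw [cbGetD_addAt _ _ _ (by omega)]; simp [g2.2]
    · rw [cbGetD_addAt _ _ _ (by omega)]
      have : m ≠ j-1 := fun hm => g2 ⟨g1, hm⟩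
      simp [this]
    · exact absurd g3.1 g1
    · simp
  have e2 : ∀ m, d2.getD m 0 = d1.getD m 0 + if j+1 < L ∧ m = j+1 then h else 0 := by
    intro m; rw [hd2]; split_ifs with g1 g2 g3
    · rw [cbGetD_addAt _ _ _ (by omega)]; simp [g2.2]
    · rw [cbGetD_addAt _ _ _ (by omega)]
      have : m ≠ j+1 := fun hm => g2 ⟨g1, hm⟩
      simp [this]
    · exact absurd g3.1 g1
    · simp
  have e3 : (d2.set j (d2.getD j 0 - 2*h)).getD k 0 = d2.getD k 0 + if k = j then -(2*h) else 0 := by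
    rw [sub_eq_add_neg]; exact cbGetD_addAt d2 j (-(2*h)) (by omega) k
  rw [e3, e2, e1, cbDlt]
  split_ifs <;> omega

lemma cbBulk_length (L j : Nat) (h : Int) (d : List Int) : (cbBulk L j h d).length = d.length := by
  simp only [cbBulk]; split_ifs <;> simp

lemma cbFire1_eq_bulk (L j : Nat) (d : List Int) : cbFire1 L j d = cbBulk L j 1 d := by
  norm_num [cbFire1, cbBulk]

lemma cbFire1_length (L j : Nat) (d : List Int) : (cbFire1 L j d).length = d.length := by
  simp only [cbFire1]; split_ifs <;> simp

lemma cbFire_length (L j : Nat) (d : List Int) : (cbFire L j d).length = d.length := by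
  simp only [cbFire]; split_ifs <;> simp

lemma cbFire1_getD (L j : Nat) (d : List Int) (hL : d.length = L) (hj : j < L) (k : Nat) :
    (cbFire1 L j d).getD k 0 = d.getD k 0 + cbDlt L j k := by
  rw [cbFire1_eq_bulk, cbBulk_getD L j 1 d hL hj k, one_mul]

lemma cbExt {c d : List Int} (hl : c.length = d.length)
    (h : ∀ k, k < c.length → c.getD k 0 = d.getD k 0) : c = d := by
  apply List.ext_getElem hl
  intro k h1 h2
  have := h k h1
  rwa [List.getD_eq_getElem c 0 h1, List.getD_eq_getElem d 0 h2] at this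

lemma cbFire_eq_bulk (L j : Nat) (d : List Int) (hL : d.length = L) (hj : j < L) :
    cbFire L j d = cbBulk L j (PySem.Int.floordiv (d.getD j 0) 2) d := by
  simp only [cbFire, cbBulk]
  congr 1
  set d1 := if 1 ≤ j then d.set (j-1) (d.getD (j-1) 0 + PySem.Int.floordiv (d.getD j 0) 2) else d with hd1
  set d2 := if j+1 < L then d1.set (j+1) (d1.getD (j+1) 0 + PySem.Int.floordiv (d.getD j 0) 2) else d1 with hd2
  have l1 : d1.length = L := by rw [hd1]; split_ifs <;> simp [hL]
  have hj2 : d2.getD j 0 = d.getD j 0 := by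
    rw [hd2, hd1]
    split_ifs with g1 g2 g3 <;> simp only [cbGetD_set, List.length_set] <;>
      (try split_ifs) <;> omega
  rw [hj2]
  have := PySem.Int.floordiv_mul_add_mod (d.getD j 0) 2
  omega

lemma cbBulk_zero (L j : Nat) (d : List Int) (hL : d.length = L) (hj : j < L) :
    cbBulk L j 0 d = d := by
  apply cbExt (by rw [cbBulk_length])
  intro k hk
  rw [cbBulk_getD L j 0 d hL hj k]; ring

lemma cbBulk_succ (L j : Nat) (m : Nat) (d : List Int) (hL : d.length = L) (hj : j < L) :
    cbBulk L j ((m:Int)+1) d = cbBulk L j (m:Int) (cbFire1 L j d) := by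
  apply cbExt (by rw [cbBulk_length, cbBulk_length, cbFire1_length])
  intro k hk
  rw [cbBulk_getD L j _ d hL hj k,
      cbBulk_getD L j _ _ (by rw [cbFire1_length, hL]) hj k,
      cbFire1_getD L j d hL hj k]
  ring

lemma cbReach_bulk (L i j : Nat) (m : Nat) (d : List Int) (hL : d.length = L) (hj : j < L)
    (hi : j ≠ i) (hm : 2*(m:Int) ≤ d.getD j 0) :
    Relation.ReflTransGen (cbStep L i) d (cbBulk L j (m:Int) d) := by
  induction m generalizing d with
  | zero => rw [Int.natCast_zero, cbBulk_zero L j d hL hj]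
  | succ m ih =>
      have h2 : 2 ≤ d.getD j 0 := by push_cast at hm; omega
      have hstep : cbStep L i d (cbFire1 L j d) := ⟨hL, j, hj, hi, h2, rfl⟩
      have hval : (cbFire1 L j d).getD j 0 = d.getD j 0 - 2 := by
        rw [cbFire1_getD L j d hL hj j]; simp [cbDlt]; ring
      have := ih (cbFire1 L j d) (by rw [cbFire1_length, hL]) (by rw [hval]; push_cast at hm ⊢; omega)
      rw [show ((m+1 : Nat) : Int) = (m:Int)+1 by push_cast; ring, cbBulk_succ L j m d hL hj]
      exact Relation.ReflTransGen.head hstep this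

lemma cbDiamond (L i : Nat) (c c1 c2 : List Int)
    (h1 : cbStep L i c c1) (h2 : cbStep L i c c2) :
    c1 = c2 ∨ ∃ d, cbStep L i c1 d ∧ cbStep L i c2 d := by
  obtain ⟨hL, j, hjL, hji, hj2, rfl⟩ := h1
  obtain ⟨-, k, hkL, hki, hk2, rfl⟩ := h2
  by_cases hjk : j = k
  · subst hjk; exact Or.inl rfl
  · right
    have lj : (cbFire1 L j c).length = L := by rw [cbFire1_length, hL]
    have lk : (cbFire1 L k c).length = L := by rw [cbFire1_length, hL]
    have dj : cbDlt L j k ≥ 0 := by simp [cbDlt]; split_ifs <;> omega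
    have dk : cbDlt L k j ≥ 0 := by simp [cbDlt]; split_ifs <;> omega
    have comm : cbFire1 L k (cbFire1 L j c) = cbFire1 L j (cbFire1 L k c) := by
      apply cbExt (by rw [cbFire1_length, cbFire1_length, cbFire1_length, cbFire1_length])
      intro m hm
      rw [cbFire1_getD L k _ lj hkL m, cbFire1_getD L j c hL hjL m,
          cbFire1_getD L j _ lk hjL m, cbFire1_getD L k c hL hkL m]
      ring
    refine ⟨cbFire1 L k (cbFire1 L j c), ⟨lj, k, hkL, hki, ?_, rfl⟩, ⟨lk, j, hjL, hji, ?_, ?_⟩⟩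
    · rw [cbFire1_getD L j c hL hjL k]
      have : cbDlt L j k ≥ 0 := dj
      omega
    · rw [cbFire1_getD L k c hL hkL j]; omega
    · exact comm

lemma cbNormal_no_step {L i : Nat} {c c' : List Int} (hn : cbNormal L i c) (h : cbStep L i c c') : False := by
  obtain ⟨hL, j, hjL, hji, hj2, rfl⟩ := h
  exact absurd (hn j hjL hji) (by omega)

lemma cbNormal_reach_eq {L i : Nat} {c d : List Int} (hn : cbNormal L i c)
    (h : Relation.ReflTransGen (cbStep L i) c d) : c = d := by
  induction h with
  | refl => rfl
  | tail hs hstep ih => exact absurd (ih ▸ hstep) (fun hh => cbNormal_no_step (ih ▸ hn) hh)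

lemma cbNormal_unique (L i : Nat) (c d1 d2 : List Int)
    (r1 : Relation.ReflTransGen (cbStep L i) c d1)
    (r2 : Relation.ReflTransGen (cbStep L i) c d2)
    (n1 : cbNormal L i d1) (n2 : cbNormal L i d2) : d1 = d2 := by
  have cr := Relation.church_rosser (r := cbStep L i) ?_ r1 r2
  · obtain ⟨e, he1, he2⟩ := cr
    rw [cbNormal_reach_eq n1 he1, cbNormal_reach_eq n2 he2]
  · intro a b c' hab hac
    rcases cbDiamond L i a b c' hab hac with h | ⟨d, hbd, hcd⟩
    · exact ⟨b, Relation.ReflGen.refl, h ▸ Relation.ReflTransGen.refl⟩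
    · exact ⟨d, Relation.ReflGen.single hbd, Relation.ReflTransGen.single hcd⟩

lemma cbPot_set (c : List Int) (p : Nat) (v : Int) (hp : p < c.length) :
    cbPot (c.set p v) + (c.getD p 0).toNat * cbW c.length p
      = cbPot c + v.toNat * cbW c.length p := by
  have hmem : p ∈ Finset.range c.length := Finset.mem_range.mpr hp
  unfold cbPot
  simp only [List.length_set]
  rw [← Finset.add_sum_erase _ _ hmem, ← Finset.add_sum_erase _ _ hmem]
  have hcong : ∑ k ∈ (Finset.range c.length).erase p, ((c.set p v).getD k 0).toNat * cbW c.length k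
      = ∑ k ∈ (Finset.range c.length).erase p, (c.getD k 0).toNat * cbW c.length k := by
    apply Finset.sum_congr rfl
    intro k hk
    have hkp : k ≠ p := (Finset.mem_erase.mp hk).1
    rw [cbGetD_set]
    simp [hkp]
  rw [hcong, cbGetD_set]
  simp [hp]
  ring

lemma cbW_ineq (L j : Nat) (hj : j < L) :
    (if 1 ≤ j then cbW L (j-1) else 0) + (if j+1 < L then cbW L (j+1) else 0) + 2 ≤ 2 * cbW L j := by
  unfold cbW
  split_ifs with g1 g2 g2'
  · -- interior
    obtain ⟨p, rfl⟩ : ∃ p, j = p+1 := ⟨j-1, by omega⟩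
    obtain ⟨m, rfl⟩ : ∃ m, L = (p+1)+1+m+1 := ⟨L-p-3, by omega⟩
    have e1 : p+1-1 = p := by omega
    have e2 : (p+1)+1+m+1 - p = m+3 := by omega
    have e3 : (p+1)+1+m+1 - (p+1) = m+2 := by omega
    have e4 : (p+1)+1+m+1 - (p+1+1) = m+1 := by omega
    rw [e1, e2, e3, e4]
    nlinarith
  · -- right edge
    obtain ⟨p, rfl⟩ : ∃ p, j = p+1 := ⟨j-1, by omega⟩
    have hL : L = p+2 := by omega
    subst hL
    have e1 : p+1-1 = p := by omega
    have e2 : p+2 - p = 2 := by omega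
    have e3 : p+2 - (p+1) = 1 := by omega
    rw [e1, e2, e3]
    nlinarith
  · -- left edge, L ≥ 2
    have hj0 : j = 0 := by omega
    subst hj0
    omega
  · -- single cell
    have hj0 : j = 0 := by omega
    have hL : L = 1 := by omega
    subst hj0; subst hL; norm_num

lemma cbPot_fire1 {L i : Nat} {c c' : List Int} (h : cbStep L i c c') :
    cbPot c' + 2 ≤ cbPot c := by
  obtain ⟨hL, j, hjL, hji, hj2, rfl⟩ := h
  simp only [cbFire1]
  set a := c.getD j 0 with ha
  set d1 := if 1 ≤ j then c.set (j-1) (c.getD (j-1) 0 + 1) else c with hd1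
  set d2 := if j+1 < L then d1.set (j+1) (d1.getD (j+1) 0 + 1) else d1 with hd2
  have l1 : d1.length = c.length := by rw [hd1]; split_ifs <;> simp
  have l2 : d2.length = c.length := by rw [hd2]; split_ifs <;> simp [l1]
  -- step 1
  have s1 : cbPot d1 ≤ cbPot c + (if 1 ≤ j then cbW L (j-1) else 0) := by
    rw [hd1]; split_ifs with g
    · have hp : j-1 < c.length := by omega
      have := cbPot_set c (j-1) (c.getD (j-1) 0 + 1) hp
      have htn : (c.getD (j-1) 0 + 1).toNat ≤ (c.getD (j-1) 0).toNat + 1 := by omega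
      have hmul : (c.getD (j-1) 0 + 1).toNat * cbW c.length (j-1)
          ≤ (c.getD (j-1) 0).toNat * cbW c.length (j-1) + cbW c.length (j-1) :=
        le_trans (Nat.mul_le_mul_right _ htn) (by rw [Nat.add_mul, one_mul])
      rw [hL] at this hmul
      generalize (c.getD (j-1) 0).toNat * cbW L (j-1) = T0 at this hmul
      generalize (c.getD (j-1) 0 + 1).toNat * cbW L (j-1) = T1 at this hmul
      omega
    · omega
  -- step 2
  have s2 : cbPot d2 ≤ cbPot d1 + (if j+1 < L then cbW L (j+1) else 0) := by
    rw [hd2]; split_ifs with g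
    · have hp : j+1 < d1.length := by omega
      have := cbPot_set d1 (j+1) (d1.getD (j+1) 0 + 1) hp
      have htn : (d1.getD (j+1) 0 + 1).toNat ≤ (d1.getD (j+1) 0).toNat + 1 := by omega
      have hmul : (d1.getD (j+1) 0 + 1).toNat * cbW d1.length (j+1)
          ≤ (d1.getD (j+1) 0).toNat * cbW d1.length (j+1) + cbW d1.length (j+1) :=
        le_trans (Nat.mul_le_mul_right _ htn) (by rw [Nat.add_mul, one_mul])
      rw [l1, hL] at this hmul
      generalize (d1.getD (j+1) 0).toNat * cbW L (j+1) = T0 at this hmul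
      generalize (d1.getD (j+1) 0 + 1).toNat * cbW L (j+1) = T1 at this hmul
      omega
    · omega
  -- step 3: the fired position
  have hv2 : d2.getD j 0 = a := by
    rw [hd2, hd1]
    split_ifs <;> (try simp only [cbGetD_set, List.length_set]) <;> (try split_ifs) <;> omega
  have s3 : cbPot (d2.set j (d2.getD j 0 - 2)) + 2 * cbW L j ≤ cbPot d2 := by
    rw [hv2]
    have hp : j < d2.length := by omega
    have := cbPot_set d2 j (a - 2) hp
    rw [hv2] at this
    have h2a : (a - 2).toNat = a.toNat - 2 := by omega
    have h2b : 2 ≤ a.toNat := by omega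
    rw [h2a] at this
    have hexp : a.toNat * cbW d2.length j = (a.toNat - 2) * cbW d2.length j + 2 * cbW d2.length j := by
      rw [← Nat.add_mul]; congr 1; omega
    rw [l2, hL] at this hexp
    generalize (a.toNat - 2) * cbW L j = X at this hexp
    generalize a.toNat * cbW L j = Z at this hexp
    generalize 2 * cbW L j = Y at this hexp ⊢
    omega
  have hW := cbW_ineq L j hjL
  clear_value a d1 d2
  rw [hv2] at s3 ⊢
  generalize (if 1 ≤ j then cbW L (j-1) else 0) = W1 at s1 hW
  generalize (if j+1 < L then cbW L (j+1) else 0) = W2 at s2 hW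
  generalize 2 * cbW L j = WJ at s3 hW
  omega

lemma cbPot_reach {L i : Nat} {c d : List Int}
    (r : Relation.ReflTransGen (cbStep L i) c d) : cbPot d ≤ cbPot c := by
  induction r with
  | refl => exact le_refl _
  | tail hs hstep ih => exact le_trans (by have := cbPot_fire1 hstep; omega) ih

lemma cbFire_facts (L i j : Nat) (d : List Int) (hL : d.length = L) (hj : j < L) (hi : j ≠ i)
    (h2 : 2 ≤ d.getD j 0) :
    Relation.ReflTransGen (cbStep L i) d (cbFire L j d) ∧ cbPot (cbFire L j d) + 2 ≤ cbPot d := by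
  set a := d.getD j 0 with ha
  have hfd : 0 < PySem.Int.floordiv a 2 := by
    rw [PySem.Int.floordiv_eq_ediv_of_pos (by omega)]
    omega
  obtain ⟨m, hm⟩ : ∃ m : Nat, PySem.Int.floordiv a 2 = ((m+1 : Nat) : Int) :=
    ⟨(PySem.Int.floordiv a 2).toNat - 1, by omega⟩
  have h2m : 2 * ((m+1 : Nat) : Int) ≤ a := by
    rw [← hm]
    have := PySem.Int.floordiv_mul_add_mod a 2
    have := PySem.Int.mod_nonneg a (by omega : (0:Int) < 2)
    omega
  have heq : cbFire L j d = cbBulk L j ((m+1 : Nat) : Int) d := by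
    rw [cbFire_eq_bulk L j d hL hj, ← ha, hm]
  have hreach := cbReach_bulk L i j (m+1) d hL hj hi h2m
  refine ⟨heq ▸ hreach, ?_⟩
  -- potential: first basic step then the rest
  have hstep : cbStep L i d (cbFire1 L j d) := ⟨hL, j, hj, hi, h2, rfl⟩
  have hrest : Relation.ReflTransGen (cbStep L i) (cbFire1 L j d) (cbBulk L j ((m:Nat) : Int) (cbFire1 L j d)) := by
    apply cbReach_bulk L i j m (cbFire1 L j d) (by rw [cbFire1_length, hL]) hj hi
    rw [cbFire1_getD L j d hL hj j]
    simp only [cbDlt, if_pos]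
    push_cast at h2m ⊢
    omega
  have hsucc : cbBulk L j ((m+1 : Nat) : Int) d = cbBulk L j ((m:Nat) : Int) (cbFire1 L j d) := by
    rw [show ((m+1 : Nat) : Int) = ((m:Nat) : Int) + 1 by push_cast; ring]
    exact cbBulk_succ L j m d hL hj
  have p1 := cbPot_fire1 hstep
  have p2 := cbPot_reach hrest
  rw [heq, hsucc]
  omega

lemma cbFire_getD_mono (L j : Nat) (d : List Int) (hL : d.length = L) (hj : j < L)
    (h2 : 2 ≤ d.getD j 0) (k : Nat) (hk : k ≠ j) :
    d.getD k 0 ≤ (cbFire L j d).getD k 0 := by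
  rw [cbFire_eq_bulk L j d hL hj, cbBulk_getD L j _ d hL hj k]
  have hfd : 0 ≤ PySem.Int.floordiv (d.getD j 0) 2 := by
    rw [PySem.Int.floordiv_eq_ediv_of_pos (by omega)]; omega
  have hd : 0 ≤ cbDlt L j k := by simp [cbDlt]; split_ifs <;> omega
  nlinarith

lemma cbFire_getD_self (L j : Nat) (d : List Int) (hL : d.length = L) (hj : j < L)
    (_h2 : 2 ≤ d.getD j 0) : 0 ≤ (cbFire L j d).getD j 0 ∧ (cbFire L j d).getD j 0 < 2 := by
  rw [cbFire_eq_bulk L j d hL hj, cbBulk_getD L j _ d hL hj j]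
  simp only [cbDlt, mul_neg, mul_ite]
  norm_num
  have := PySem.Int.floordiv_mul_add_mod (d.getD j 0) 2
  have := PySem.Int.mod_nonneg (d.getD j 0) (by omega : (0:Int) < 2)
  have := PySem.Int.mod_lt (d.getD j 0) (by omega : (0:Int) < 2)
  omega

lemma cbFire_getD_eq (L j : Nat) (d : List Int) (hL : d.length = L) (hj : j < L) (k : Nat)
    (h0 : k ≠ j) (h1 : k+1 ≠ j) (h2 : k ≠ j+1) : (cbFire L j d).getD k 0 = d.getD k 0 := by
  rw [cbFire_eq_bulk L j d hL hj, cbBulk_getD L j _ d hL hj k]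
  simp [cbDlt, h0, h1, h2]

lemma loopA_spec (fuel : Nat) : ∀ (L i : Nat) (dup : List Int) (q : List Nat) (s : PySem.Set Nat),
    cbInvA L i dup q s → cbPot dup + q.length < fuel →
    Relation.ReflTransGen (cbStep L i) dup (cbLoopA L i fuel dup q s) ∧
    cbNormal L i (cbLoopA L i fuel dup q s) := by
  induction fuel with
  | zero => intro L i dup q s _ hF; omega
  | succ f ih =>
    intro L i dup q s hInv hF
    obtain ⟨hlen, hnd, hsq, hq, hcomp⟩ := hInv
    rcases q with _ | ⟨j, q'⟩
    · simp only [cbLoopA]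
      refine ⟨Relation.ReflTransGen.refl, ?_⟩
      intro k hk hki
      by_contra hge
      exact absurd (hcomp k hk hki (by omega)) (by simp)
    · obtain ⟨hjL, hji, hj2⟩ := hq j List.mem_cons_self
      obtain ⟨hreach, hpot⟩ := cbFire_facts L i j dup hlen hjL hji hj2
      have hdlen : (cbFire L j dup).length = L := by rw [cbFire_length, hlen]
      have hjq' : j ∉ q' := (List.nodup_cons.mp hnd).1
      have hnd' : q'.Nodup := (List.nodup_cons.mp hnd).2
      have hs1 : ∀ k, k ∈ PySem.Set.discard s j ↔ k ∈ q' := by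
        intro k
        rw [PySem.Set.mem_discard, hsq]
        constructor
        · rintro ⟨hk, hne⟩
          rcases List.mem_cons.mp hk with h | h
          · exact absurd h hne
          · exact h
        · intro hk; exact ⟨List.mem_cons_of_mem _ hk, fun he => hjq' (he ▸ hk)⟩
      have hmono : ∀ k ∈ q', 2 ≤ (cbFire L j dup).getD k 0 := by
        intro k hk
        obtain ⟨hkL, hki, hk2⟩ := hq k (List.mem_cons_of_mem _ hk)
        have := cbFire_getD_mono L j dup hlen hjL hj2 k (fun he => hjq' (he ▸ hk))
        omega
      have hself := cbFire_getD_self L j dup hlen hjL hj2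
      have key : ∀ (q2 : List Nat) (s2 : PySem.Set Nat), (∀ k, k ∈ s2 ↔ k ∈ q2) → q2.Nodup →
          (∀ k ∈ q2, k < L ∧ k ≠ i ∧ 2 ≤ (cbFire L j dup).getD k 0) →
          (∀ k, k < L → k ≠ i → 2 ≤ (cbFire L j dup).getD k 0 → k ∈ q2) →
          q2.length ≤ q'.length + 2 →
          Relation.ReflTransGen (cbStep L i) dup (cbLoopA L i f (cbFire L j dup) q2 s2) ∧
          cbNormal L i (cbLoopA L i f (cbFire L j dup) q2 s2) := by
        intro q2 s2 m1 m2 m3 m4 m5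
        have hF' : cbPot (cbFire L j dup) + q2.length < f := by
          simp only [List.length_cons] at hF
          omega
        obtain ⟨r, n⟩ := ih L i (cbFire L j dup) q2 s2 ⟨hdlen, m2, m1, m3, m4⟩ hF'
        exact ⟨Relation.ReflTransGen.trans hreach r, n⟩
      simp only [cbLoopA]
      set d := cbFire L j dup with hd
      have hnotj : ∀ k, 2 ≤ d.getD k 0 → k ≠ j := by
        intro k h2' he
        subst he
        omega
      have hcases : ∀ k, k < L → k ≠ i → 2 ≤ d.getD k 0 → k ≠ j →
          (k ∈ q') ∨ (1 ≤ j ∧ k = j-1) ∨ (k = j+1) := by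
        intro k hkL hki hk2 hkj
        by_cases hk1 : k+1 = j
        · right; left; omega
        · by_cases hk2' : k = j+1
          · right; right; exact hk2'
          · have heq := cbFire_getD_eq L j dup hlen hjL k hkj hk1 hk2'
            rw [← hd] at heq
            have hdup2 : 2 ≤ dup.getD k 0 := by omega
            rcases List.mem_cons.mp (hcomp k hkL hki hdup2) with h | h
            · exact absurd h hkj
            · exact Or.inl h
      by_cases hC1 : 1 ≤ j ∧ 2 ≤ d.getD (j-1) 0 ∧ j-1 ≠ i ∧ (j-1) ∉ PySem.Set.discard s j
      · have h1q : j-1 ∉ q' := fun hh => hC1.2.2.2 ((hs1 _).mpr hh)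
        by_cases hC2 : j+1 < L ∧ 2 ≤ d.getD (j+1) 0 ∧ j+1 ≠ i ∧
            (j+1) ∉ PySem.Set.add (PySem.Set.discard s j) (j-1)
        · -- both enqueued
          have h2q : j+1 ∉ q' := fun hh =>
            hC2.2.2.2 (by rw [PySem.Set.mem_add, hs1]; exact Or.inl hh)
          have h2ne : j+1 ≠ j-1 := fun hh =>
            hC2.2.2.2 (by rw [PySem.Set.mem_add]; exact Or.inr hh)
          simp only [if_pos hC1, if_pos hC2]
          apply key
          · intro k
            rw [PySem.Set.mem_add, PySem.Set.mem_add, hs1]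
            simp [List.mem_append]
            tauto
          · simp [List.nodup_append, hnd']
            exact fun a ha => ⟨fun h => h1q (h ▸ ha), fun h => h2q (h ▸ ha)⟩
          · intro k hk
            rcases List.mem_append.mp hk with hk | hk
            · rcases List.mem_append.mp hk with hk | hk
              · exact ⟨(hq k (List.mem_cons_of_mem _ hk)).1, (hq k (List.mem_cons_of_mem _ hk)).2.1, hmono k hk⟩
              · rw [List.mem_singleton] at hk
                subst hk; exact ⟨by omega, hC1.2.2.1, hC1.2.1⟩
            · rw [List.mem_singleton] at hk
              subst hk; exact ⟨hC2.1, hC2.2.2.1, hC2.2.1⟩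
          · intro k hkL hki hk2
            rcases hcases k hkL hki hk2 (hnotj k hk2) with h | ⟨h1, h⟩ | h <;>
              simp [List.mem_append, h]
          · simp
        · -- only j-1 enqueued
          simp only [if_pos hC1, if_neg hC2]
          apply key
          · intro k
            rw [PySem.Set.mem_add, hs1]
            simp [List.mem_append]
          · simp [List.nodup_append, hnd']
            exact fun a ha h => h1q (h ▸ ha)
          · intro k hk
            rcases List.mem_append.mp hk with hk | hk
            · exact ⟨(hq k (List.mem_cons_of_mem _ hk)).1, (hq k (List.mem_cons_of_mem _ hk)).2.1, hmono k hk⟩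
            · rw [List.mem_singleton] at hk
              subst hk; exact ⟨by omega, hC1.2.2.1, hC1.2.1⟩
          · intro k hkL hki hk2
            rcases hcases k hkL hki hk2 (hnotj k hk2) with h | ⟨h1, h⟩ | h
            · simp [List.mem_append, h]
            · simp [List.mem_append, h]
            · -- k = j+1 but C2 failed: j+1 must already be present
              subst h
              have hmem : (j+1) ∈ PySem.Set.add (PySem.Set.discard s j) (j-1) := by
                by_contra hnm
                exact hC2 ⟨hkL, hk2, hki, hnm⟩
              rw [PySem.Set.mem_add, hs1] at hmem
              rcases hmem with h | h
              · simp [List.mem_append, h]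
              · omega
          · simp
      · -- j-1 not enqueued
        simp only [if_neg hC1]
        have hfromC1 : ∀ k, k < L → k ≠ i → 2 ≤ d.getD k 0 → 1 ≤ j → k = j-1 → k ∈ q' := by
          intro k hkL hki hk2 hj1 hkval
          by_contra hnm
          apply hC1
          subst hkval
          exact ⟨hj1, hk2, hki, fun hh => hnm ((hs1 _).mp hh)⟩
        by_cases hC2 : j+1 < L ∧ 2 ≤ d.getD (j+1) 0 ∧ j+1 ≠ i ∧ (j+1) ∉ PySem.Set.discard s j
        · have h2q : j+1 ∉ q' := fun hh => hC2.2.2.2 ((hs1 _).mpr hh)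
          simp only [if_pos hC2]
          apply key
          · intro k
            rw [PySem.Set.mem_add, hs1]
            simp [List.mem_append]
          · simp [List.nodup_append, hnd']
            exact fun a ha h => h2q (h ▸ ha)
          · intro k hk
            rcases List.mem_append.mp hk with hk | hk
            · exact ⟨(hq k (List.mem_cons_of_mem _ hk)).1, (hq k (List.mem_cons_of_mem _ hk)).2.1, hmono k hk⟩
            · rw [List.mem_singleton] at hk
              subst hk; exact ⟨hC2.1, hC2.2.2.1, hC2.2.1⟩
          · intro k hkL hki hk2
            rcases hcases k hkL hki hk2 (hnotj k hk2) with h | ⟨h1, h⟩ | h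
            · simp [List.mem_append, h]
            · simp [List.mem_append, hfromC1 k hkL hki hk2 h1 h]
            · simp [List.mem_append, h]
          · simp
        · simp only [if_neg hC2]
          have hfromC2 : ∀ k, k < L → k ≠ i → 2 ≤ d.getD k 0 → k = j+1 → k ∈ q' := by
            intro k hkL hki hk2 hkval
            by_contra hnm
            apply hC2
            subst hkval
            exact ⟨hkL, hk2, hki, fun hh => hnm ((hs1 _).mp hh)⟩
          apply key
          · exact hs1
          · exact hnd'
          · intro k hk
            exact ⟨(hq k (List.mem_cons_of_mem _ hk)).1, (hq k (List.mem_cons_of_mem _ hk)).2.1, hmono k hk⟩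
          · intro k hkL hki hk2
            rcases hcases k hkL hki hk2 (hnotj k hk2) with h | ⟨h1, h⟩ | h
            · exact h
            · exact hfromC1 k hkL hki hk2 h1 h
            · exact hfromC2 k hkL hki hk2 h
          · simp

lemma passB_fold (L i : Nat) : ∀ (l : List Nat) (d : List Int) (b : Bool),
    (∀ j ∈ l, j < L) → d.length = L →
    Relation.ReflTransGen (cbStep L i)
      d (l.foldl (fun st j => if j ≠ i ∧ 2 ≤ st.1.getD j 0 then (cbFire L j st.1, true) else st) (d, b)).1 ∧
    ((l.foldl (fun st j => if j ≠ i ∧ 2 ≤ st.1.getD j 0 then (cbFire L j st.1, true) else st) (d, b)).1.length = L) ∧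
    cbPot (l.foldl (fun st j => if j ≠ i ∧ 2 ≤ st.1.getD j 0 then (cbFire L j st.1, true) else st) (d, b)).1 ≤ cbPot d ∧
    (b = false → (l.foldl (fun st j => if j ≠ i ∧ 2 ≤ st.1.getD j 0 then (cbFire L j st.1, true) else st) (d, b)).2 = true →
      cbPot (l.foldl (fun st j => if j ≠ i ∧ 2 ≤ st.1.getD j 0 then (cbFire L j st.1, true) else st) (d, b)).1 + 2 ≤ cbPot d) ∧
    ((l.foldl (fun st j => if j ≠ i ∧ 2 ≤ st.1.getD j 0 then (cbFire L j st.1, true) else st) (d, b)).2 = false →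
      b = false ∧
      (l.foldl (fun st j => if j ≠ i ∧ 2 ≤ st.1.getD j 0 then (cbFire L j st.1, true) else st) (d, b)).1 = d ∧
      ∀ j ∈ l, j ≠ i → d.getD j 0 < 2) := by
  intro l
  induction l with
  | nil =>
      intro d b _ hlen
      exact ⟨Relation.ReflTransGen.refl, hlen, le_refl _, by simp, fun hb => ⟨hb, rfl, by simp⟩⟩
  | cons j l ihl =>
      intro d b hmem hlen
      have hjL : j < L := hmem j List.mem_cons_self
      simp only [List.foldl_cons]
      by_cases hC : j ≠ i ∧ 2 ≤ d.getD j 0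
      · simp only [if_pos hC]
        obtain ⟨hreach, hpot⟩ := cbFire_facts L i j d hlen hjL hC.1 hC.2
        have hflen : (cbFire L j d).length = L := by rw [cbFire_length, hlen]
        obtain ⟨r1, r2, r3, _, r5⟩ := ihl (cbFire L j d) true (fun k hk => hmem k (List.mem_cons_of_mem _ hk)) hflen
        refine ⟨Relation.ReflTransGen.trans hreach r1, r2, by omega, fun _ h => by omega, fun hfalse => ?_⟩
        exact absurd (r5 hfalse).1 (by simp)
      · simp only [if_neg hC]
        obtain ⟨r1, r2, r3, r4, r5⟩ := ihl d b (fun k hk => hmem k (List.mem_cons_of_mem _ hk)) hlen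
        refine ⟨r1, r2, r3, r4, fun hfalse => ?_⟩
        obtain ⟨b0, hde, hsmall⟩ := r5 hfalse
        refine ⟨b0, hde, ?_⟩
        intro k hk hki
        rcases List.mem_cons.mp hk with h | h
        · subst h
          by_contra hge
          exact hC ⟨hki, by omega⟩
        · exact hsmall k h hki

lemma loopB_spec (fuel : Nat) : ∀ (L i : Nat) (d : List Int), d.length = L → cbPot d < fuel →
    Relation.ReflTransGen (cbStep L i) d (cbLoopB L i fuel d) ∧
    cbNormal L i (cbLoopB L i fuel d) := by
  induction fuel with
  | zero => intro L i d _ hF; omega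
  | succ f ih =>
    intro L i d hlen hF
    simp only [cbLoopB]
    obtain ⟨r1, r2, r3, r4, r5⟩ := passB_fold L i (List.range L) d false
      (fun k hk => List.mem_range.mp hk) hlen
    have e : ((List.range L).foldl
        (fun st j => if j ≠ i ∧ 2 ≤ st.1.getD j 0 then (cbFire L j st.1, true) else st)
        (d, false)) = cbPass L i d := rfl
    rw [e] at r1 r2 r3 r4 r5
    by_cases hfire : (cbPass L i d).2
    · simp only [if_pos hfire]
      have hp2 : cbPot (cbPass L i d).1 + 2 ≤ cbPot d := r4 rfl hfire
      obtain ⟨rr, nn⟩ := ih L i (cbPass L i d).1 r2 (by omega)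
      exact ⟨Relation.ReflTransGen.trans r1 rr, nn⟩
    · simp only [if_neg hfire]
      have hfalse : (cbPass L i d).2 = false := by simpa using hfire
      obtain ⟨-, hde, hsmall⟩ := r5 hfalse
      constructor
      · rw [hde]
      · intro k hk hki
        rw [hde]
        exact hsmall k (List.mem_range.mpr hk) hki

lemma sum_getD_eq (c : List Int) :
    ∑ k ∈ Finset.range c.length, (c.getD k 0).toNat = (c.map Int.toNat).sum := by
  induction c with
  | nil => simp
  | cons x c ih =>
      rw [List.length_cons, Finset.sum_range_succ']
      simp only [List.getD_cons_succ, List.getD_cons_zero, List.map_cons, List.sum_cons]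
      omega

lemma cbPot_le (c : List Int) :
    cbPot c ≤ (c.map Int.toNat).sum * (c.length+1) * (c.length+1) := by
  unfold cbPot
  calc ∑ k ∈ Finset.range c.length, (c.getD k 0).toNat * cbW c.length k
      ≤ ∑ k ∈ Finset.range c.length, (c.getD k 0).toNat * ((c.length+1) * (c.length+1)) := by
        apply Finset.sum_le_sum
        intro k hk
        apply Nat.mul_le_mul_left
        unfold cbW
        have := Finset.mem_range.mp hk
        exact Nat.mul_le_mul (by omega) (by omega)
    _ = (c.map Int.toNat).sum * (c.length+1) * (c.length+1) := by
        rw [← Finset.sum_mul, sum_getD_eq, Nat.mul_assoc]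

theorem CoffeeBreak_correct (n : List Int) : CoffeeBreak n = CoffeeBreak_alt n := by
  unfold CoffeeBreak CoffeeBreak_alt
  apply List.map_congr_left
  intro i hi
  have hiL : i < n.length := List.mem_range.mp hi
  set L := n.length with hL
  set q0 := (List.range L).filter (fun j => decide (2 ≤ n.getD j 0 ∧ j ≠ i)) with hq0
  have hmemq : ∀ k, k ∈ q0 ↔ (k < L ∧ 2 ≤ n.getD k 0 ∧ k ≠ i) := by
    intro k
    rw [hq0, List.mem_filter, List.mem_range]
    simp
    try tauto
  have hInv : cbInvA L i n q0 (PySem.Set.ofList q0) := by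
    refine ⟨rfl, List.Nodup.filter _ (List.nodup_range), ?_, ?_, ?_⟩
    · intro k; rw [PySem.Set.mem_ofList]
    · intro k hk; have := (hmemq k).mp hk; tauto
    · intro k h1 h2 h3; exact (hmemq k).mpr ⟨h1, h3, h2⟩
  have hq0len : q0.length ≤ L := by
    rw [hq0]
    calc ((List.range L).filter _).length ≤ (List.range L).length := List.length_filter_le _ _
      _ = L := List.length_range
  have hfuelA : cbPot n + q0.length < cbFuel n := by
    have := cbPot_le n
    unfold cbFuel
    omega
  have hfuelB : cbPot n < cbFuel n := by
    have := cbPot_le n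
    unfold cbFuel
    omega
  obtain ⟨ra, na⟩ := loopA_spec (cbFuel n) L i n q0 (PySem.Set.ofList q0) hInv hfuelA
  obtain ⟨rb, nb⟩ := loopB_spec (cbFuel n) L i n rfl hfuelB
  show (cbLoopA L i (cbFuel n) n q0 (PySem.Set.ofList q0)).getD i 0
      = (cbLoopB L i (cbFuel n) n).getD i 0
  rw [cbNormal_unique L i n _ _ ra rb na nb]

-- ===== VERDICT (by name: the statement is the Claim_ definition above) =====
theorem CoffeeBreak_spec : Claim_equal_CoffeeBreak := by
  intro n _
  unfold Spec_CoffeeBreak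
  exact CoffeeBreak_correct n
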